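-- pv_equiv track=rewrite | github.com/Muz-guzgu/bkaczmarczyk | matura/matura 2018/zadanie.py | zad_4_3
-- ===== SOURCE A (Python) =====
-- def zad_4_3(dane):
--     dane_max_10 = []
--     for wiersz in dane:
--         czy_max_10 = True
--         for litera1 in wiersz:
--             for litera2 in wiersz:
--                 if not -10 <= ord(litera1) - ord(litera2) <= 10:
--                     czy_max_10 = False
--                     break
--             if czy_max_10 == False:
--                 break
--         if czy_max_10 == True:
--             dane_max_10.append(wiersz)
--     return dane_max_10
-- ===== SOURCE B (Python) =====
-- def zad_4_3(dane):
--     def ok(wiersz):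
--         if not wiersz:
--             return True
--         lo = hi = ord(wiersz[0])
--         for c in wiersz[1:]:
--             o = ord(c)
--             if o < lo:
--                 lo = o
--             elif o > hi:
--                 hi = o
--         return hi - lo <= 10
--     return [wiersz for wiersz in dane if ok(wiersz)]
-- ===== Notes on version B (the rewrite author's own statement) =====
-- stated objective: faster
-- what changed: Replaced the O(L^2) all-pairs character comparison per row with one linear min/max scan (row kept iff max ord - min ord <= 10) and built the result with a filter comprehension.
import Mathlib
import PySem

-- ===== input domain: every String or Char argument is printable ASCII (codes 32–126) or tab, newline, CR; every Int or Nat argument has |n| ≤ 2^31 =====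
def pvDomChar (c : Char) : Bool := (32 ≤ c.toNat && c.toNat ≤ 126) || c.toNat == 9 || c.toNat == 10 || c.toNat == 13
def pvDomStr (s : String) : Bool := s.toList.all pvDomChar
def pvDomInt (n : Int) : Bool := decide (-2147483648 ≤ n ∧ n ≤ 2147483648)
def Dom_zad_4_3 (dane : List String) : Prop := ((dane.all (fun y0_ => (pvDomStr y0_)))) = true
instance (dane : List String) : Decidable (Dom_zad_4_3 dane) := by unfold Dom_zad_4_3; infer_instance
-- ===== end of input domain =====

-- B replaces A's O(L^2) all-pairs character check per row by a single linear
-- min/max scan (row kept iff max ord - min ord ≤ 10); same kept rows, same order.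

-- ===== PORT A =====
-- inner loop: 'for litera2 in wiersz: if not -10 <= ord(l1)-ord(l2) <= 10: flag=False; break'
def zadInnerA (c1 : Char) : List Char → Bool
  | [] => true
  | c2 :: rest =>
      if ¬(-10 ≤ (c1.toNat : Int) - (c2.toNat : Int) ∧ (c1.toNat : Int) - (c2.toNat : Int) ≤ 10)
      then false
      else zadInnerA c1 rest

-- outer loop: 'for litera1 in wiersz: … ; if czy_max_10 == False: break'
def zadOuterA (w : List Char) : List Char → Bool
  | [] => true
  | c1 :: rest => if zadInnerA c1 w then zadOuterA w rest else false

def zad_4_3 (dane : List String) : List String :=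
  dane.foldl (fun acc w => if zadOuterA w.toList w.toList then acc ++ [w] else acc) []

-- ===== PORT B =====
-- one iteration of Source B's for-loop: update (lo, hi) with the next char's ord
def zadStep (p : Int × Int) (c2 : Char) : Int × Int :=
  if (c2.toNat : Int) < p.1 then ((c2.toNat : Int), p.2)
  else if (c2.toNat : Int) > p.2 then (p.1, (c2.toNat : Int))
  else p

def zadOkB (w : List Char) : Bool :=
  match w with
  | [] => true
  | c :: rest =>
      let p := rest.foldl zadStep ((c.toNat : Int), (c.toNat : Int))
      decide (p.2 - p.1 ≤ 10)

def zad_4_3_alt (dane : List String) : List String :=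
  dane.filter (fun w => zadOkB w.toList)

-- ===== PRECONDITION & SPEC =====
def Spec_zad_4_3 (dane : List String) (out : List String) : Prop := out = zad_4_3_alt dane
instance (dane : List String) (out : List String) : Decidable (Spec_zad_4_3 dane out) := by unfold Spec_zad_4_3; infer_instance

-- ===== CLAIM (what is proved, stated in full; the proofs are below) =====
def Claim_equal_zad_4_3 : Prop := ∀ (dane : List String), Dom_zad_4_3 dane → Spec_zad_4_3 dane (zad_4_3 dane)

-- ===== LEMMAS AND PROOFS =====

theorem zadInnerA_iff (c1 : Char) (l : List Char) :
    zadInnerA c1 l = true ↔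
      ∀ c2 ∈ l, -10 ≤ (c1.toNat : Int) - (c2.toNat : Int) ∧ (c1.toNat : Int) - (c2.toNat : Int) ≤ 10 := by
  induction l with
  | nil => simp [zadInnerA]
  | cons c2 rest ih =>
      simp only [zadInnerA, List.mem_cons]
      by_cases h : -10 ≤ (c1.toNat : Int) - (c2.toNat : Int) ∧ (c1.toNat : Int) - (c2.toNat : Int) ≤ 10
      · rw [if_neg (not_not_intro h)]
        constructor
        · intro hr x hx
          rcases hx with hx | hx
          · subst hx; exact h
          · exact (ih.mp hr) x hx
        · intro hall
          exact ih.mpr (fun x hx => hall x (Or.inr hx))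
      · rw [if_pos h]
        constructor
        · intro hf; cases hf
        · intro hall; exact absurd (hall c2 (Or.inl rfl)) h

theorem zadOuterA_iff (w l : List Char) :
    zadOuterA w l = true ↔ ∀ c1 ∈ l, zadInnerA c1 w = true := by
  induction l with
  | nil => simp [zadOuterA]
  | cons c1 rest ih =>
      simp only [zadOuterA]
      by_cases h : zadInnerA c1 w = true
      · simp [h, ih]
      · simp [h]

-- invariant of B's min/max fold
theorem zadFold_spec (l : List Char) (lo hi : Int) (hlh : lo ≤ hi) :
    let p := l.foldl zadStep (lo, hi)
    p.1 ≤ lo ∧ hi ≤ p.2 ∧ p.1 ≤ p.2 ∧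
    (∀ c ∈ l, p.1 ≤ (c.toNat : Int) ∧ (c.toNat : Int) ≤ p.2) ∧
    (p.1 = lo ∨ ∃ c ∈ l, p.1 = (c.toNat : Int)) ∧
    (p.2 = hi ∨ ∃ c ∈ l, p.2 = (c.toNat : Int)) := by
  induction l generalizing lo hi with
  | nil => simp; omega
  | cons c rest ih =>
      simp only [List.foldl_cons, zadStep]
      by_cases h1 : (c.toNat : Int) < lo
      · simp only [if_pos h1]
        obtain ⟨a, b, d, e, f, g⟩ := ih (c.toNat : Int) hi (by omega)
        refine ⟨by omega, b, d, ?_, ?_, ?_⟩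
        · intro x hx
          rcases List.mem_cons.mp hx with hx | hx
          · subst hx; constructor <;> omega
          · exact e x hx
        · rcases f with f | ⟨x, hx, hxe⟩
          · exact Or.inr ⟨c, List.mem_cons_self, f⟩
          · exact Or.inr ⟨x, List.mem_cons_of_mem _ hx, hxe⟩
        · rcases g with g | ⟨x, hx, hxe⟩
          · exact Or.inl g
          · exact Or.inr ⟨x, List.mem_cons_of_mem _ hx, hxe⟩
      · simp only [if_neg h1]
        by_cases h2 : (c.toNat : Int) > hi
        · simp only [if_pos h2]
          obtain ⟨a, b, d, e, f, g⟩ := ih lo (c.toNat : Int) (by omega)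
          refine ⟨a, by omega, d, ?_, ?_, ?_⟩
          · intro x hx
            rcases List.mem_cons.mp hx with hx | hx
            · subst hx; constructor <;> omega
            · exact e x hx
          · rcases f with f | ⟨x, hx, hxe⟩
            · exact Or.inl f
            · exact Or.inr ⟨x, List.mem_cons_of_mem _ hx, hxe⟩
          · rcases g with g | ⟨x, hx, hxe⟩
            · exact Or.inr ⟨c, List.mem_cons_self, g⟩
            · exact Or.inr ⟨x, List.mem_cons_of_mem _ hx, hxe⟩
        · simp only [if_neg h2]
          obtain ⟨a, b, d, e, f, g⟩ := ih lo hi hlh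
          refine ⟨a, b, d, ?_, ?_, ?_⟩
          · intro x hx
            rcases List.mem_cons.mp hx with hx | hx
            · subst hx; constructor <;> omega
            · exact e x hx
          · rcases f with f | ⟨x, hx, hxe⟩
            · exact Or.inl f
            · exact Or.inr ⟨x, List.mem_cons_of_mem _ hx, hxe⟩
          · rcases g with g | ⟨x, hx, hxe⟩
            · exact Or.inl g
            · exact Or.inr ⟨x, List.mem_cons_of_mem _ hx, hxe⟩

theorem zadOk_eq (w : List Char) : zadOuterA w w = zadOkB w := by
  cases w with
  | nil => simp [zadOuterA, zadOkB]
  | cons c rest =>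
      obtain ⟨a, b, d, e, f, g⟩ := zadFold_spec rest (c.toNat : Int) (c.toNat : Int) le_rfl
      set p := rest.foldl zadStep ((c.toNat : Int), (c.toNat : Int)) with hp
      have memlo : p.1 = (c.toNat : Int) ∨ ∃ x ∈ rest, p.1 = (x.toNat : Int) := f
      have memhi : p.2 = (c.toNat : Int) ∨ ∃ x ∈ rest, p.2 = (x.toNat : Int) := g
      have bounds : ∀ x ∈ (c :: rest), p.1 ≤ (x.toNat : Int) ∧ (x.toNat : Int) ≤ p.2 := by
        intro x hx
        rcases List.mem_cons.mp hx with hx | hx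
        · subst hx; exact ⟨a, b⟩
        · exact e x hx
      have hB : zadOkB (c :: rest) = decide (p.2 - p.1 ≤ 10) := by
        simp only [zadOkB, ← hp]
      rw [hB]
      by_cases hsp : p.2 - p.1 ≤ 10
      · -- all pairs within 10, so A's check succeeds
        have : zadOuterA (c :: rest) (c :: rest) = true := by
          rw [zadOuterA_iff]
          intro c1 h1
          rw [zadInnerA_iff]
          intro c2 h2
          have b1 := bounds c1 h1
          have b2 := bounds c2 h2
          omega
        simp [this, hsp]
      · -- max - min > 10: the extremal pair violates A's check
        have hmemlo : p.1 = (c.toNat : Int) ∨ ∃ x ∈ (c :: rest), p.1 = (x.toNat : Int) := by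
          rcases memlo with h | ⟨x, hx, hxe⟩
          · exact Or.inl h
          · exact Or.inr ⟨x, List.mem_cons_of_mem _ hx, hxe⟩
        have hxlo : ∃ x ∈ (c :: rest), p.1 = (x.toNat : Int) := by
          rcases hmemlo with h | h
          · exact ⟨c, List.mem_cons_self, h⟩
          · exact h
        have hxhi : ∃ x ∈ (c :: rest), p.2 = (x.toNat : Int) := by
          rcases memhi with h | ⟨x, hx, hxe⟩
          · exact ⟨c, List.mem_cons_self, h⟩
          · exact ⟨x, List.mem_cons_of_mem _ hx, hxe⟩
        obtain ⟨xl, hxl, hxle⟩ := hxlo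
        obtain ⟨xh, hxh, hxhe⟩ := hxhi
        have : ¬ zadOuterA (c :: rest) (c :: rest) = true := by
          rw [zadOuterA_iff]
          intro hall
          have := (zadInnerA_iff xh (c :: rest)).mp (hall xh hxh) xl hxl
          omega
        simp only [Bool.not_eq_true] at this
        simp [this, hsp]

-- ===== VERDICT (by name: the statement is the Claim_ definition above) =====
theorem zad_4_3_spec : Claim_equal_zad_4_3 := by
  intro dane _
  unfold Spec_zad_4_3 zad_4_3 zad_4_3_alt
  rw [PySem.List.foldl_append_if_eq_filter]
  simp only [List.nil_append]
  exact List.filter_congr (fun w _ => zadOk_eq w.toList)
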